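-- pv_equiv track=rewrite | github.com/MinjungShin/algorithm | programmers/function_development.py | solution
-- ===== SOURCE A (Python) =====
-- def solution(progresses, speeds):
--     answer = []
--     while progresses:
--         cnt = 0
--         for idx, val in enumerate(progresses):
--             progresses[idx] = val + speeds[idx]
--         for i in range(len(progresses)):
--             if progresses[0] >= 100:
--                 progresses.pop(0)
--                 speeds.pop(0)
--                 cnt += 1
--             else:
--                 break
--         if cnt != 0:
--             answer.append(cnt)
--     return answer
-- ===== SOURCE B (Python) =====
-- def solution(progresses, speeds):
--     answer = []
--     leader = 0
--     count = 0
--     for p, s in zip(progresses, speeds):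
--         d = max(1, -((p - 100) // s))
--         if d > leader:
--             if count:
--                 answer.append(count)
--             leader = d
--             count = 1
--         else:
--             count += 1
--     if count:
--         answer.append(count)
--     return answer
-- ===== Notes on version B (the rewrite author's own statement) =====
-- stated objective: alternative
-- what changed: Replaces the day-by-day simulation with in-place pops by a closed-form ceiling-division day count per task and a single pass that groups tasks under a running maximum leader day (intended as asymptotically faster; the probe could not confirm a ratio because A timed out on large inputs).
-- outside the precondition, e.g. on solution([150], [0]): A returns [1], B raises ZeroDivisionError
import Mathlib
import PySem

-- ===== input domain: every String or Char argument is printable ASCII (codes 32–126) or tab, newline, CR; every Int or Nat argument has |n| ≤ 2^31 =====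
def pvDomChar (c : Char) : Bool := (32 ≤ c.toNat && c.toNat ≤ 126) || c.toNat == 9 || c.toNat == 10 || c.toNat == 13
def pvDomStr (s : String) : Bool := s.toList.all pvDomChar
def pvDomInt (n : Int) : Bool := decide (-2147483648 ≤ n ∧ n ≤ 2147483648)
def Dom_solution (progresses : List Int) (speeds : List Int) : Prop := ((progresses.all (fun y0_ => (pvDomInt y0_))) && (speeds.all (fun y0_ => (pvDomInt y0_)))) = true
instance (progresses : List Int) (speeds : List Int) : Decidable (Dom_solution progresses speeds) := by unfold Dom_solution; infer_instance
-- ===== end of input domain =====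

-- B replaces A's day-by-day simulation (with in-place pops) by a closed-form ceiling-division
-- day per task and one grouping pass; equivalence is about the RETURN value only (A empties
-- its two argument lists in place, B does not mutate them).

-- ===== PORT A =====
-- fuel for A's `while progresses:` loop: under Pre_ each task finishes within |p-100|+1 days,
-- so the total number of while-iterations is below this bound; the 0-fuel branch is unreachable
-- on inputs satisfying Pre_ (proved via the maxd bound below).
def fuelA (ps : List Int) : Nat := ps.foldr (fun p a => (p - 100).natAbs + 1 + a) 1

-- `for idx, val in enumerate(progresses): progresses[idx] = val + speeds[idx]`
-- (zipWith truncates where Python would raise IndexError; Pre_ excludes that)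
def addSpeeds (ps ss : List Int) : List Int := List.zipWith (· + ·) ps ss

-- the inner `for i in range(len(progresses))` pop loop: pops the prefix with progress ≥ 100
-- from both lists, counting (speeds.pop(0) on empty speeds would raise; Pre_ excludes that)
def popDone : List Int → List Int → Nat × List Int × List Int
  | p :: ps, ss =>
      if p ≥ 100 then
        let r := popDone ps (ss.drop 1)
        (r.1 + 1, r.2.1, r.2.2)
      else (0, p :: ps, ss)
  | [], ss => (0, [], ss)

def loopA : Nat → List Int → List Int → List Int → List Int
  | 0, _, _, ans => ans
  | fuel+1, ps, ss, ans =>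
    match ps with
    | [] => ans
    | _ :: _ =>
      let r := popDone (addSpeeds ps ss) ss
      loopA fuel r.2.1 r.2.2 (if (r.1 : Int) ≠ 0 then ans ++ [(r.1 : Int)] else ans)

def solution (progresses : List Int) (speeds : List Int) : List Int :=
  loopA (fuelA progresses) progresses speeds []

-- ===== PORT B =====
-- state = (answer, leader, count); d = max(1, -((p - 100) // s))
def stepB (st : List Int × Int × Int) (q : Int × Int) : List Int × Int × Int :=
  let d := max 1 (-(PySem.Int.floordiv (q.1 - 100) q.2))
  if d > st.2.1 then ((if st.2.2 ≠ 0 then st.1 ++ [st.2.2] else st.1), d, 1)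
  else (st.1, st.2.1, st.2.2 + 1)

def solution_alt (progresses : List Int) (speeds : List Int) : List Int :=
  let st := (progresses.zip speeds).foldl stepB ([], 0, 0)
  if st.2.2 ≠ 0 then st.1 ++ [st.2.2] else st.1

-- ===== PRECONDITION & SPEC =====
-- Pre_ excludes: (a) speeds shorter than progresses, where A raises IndexError; (b) any used
-- speed ≤ 0, where A's while loop can run forever (and B's ceiling division is undefined at 0);
-- A does return on a few such inputs (task already ≥ 100), but B naturally raises there — see cites.
def Pre_solution (progresses : List Int) (speeds : List Int) : Prop :=
  progresses.length ≤ speeds.length ∧ ∀ q ∈ progresses.zip speeds, 1 ≤ q.2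
instance (progresses : List Int) (speeds : List Int) : Decidable (Pre_solution progresses speeds) := by
  unfold Pre_solution; infer_instance
def pvWitness_solution : List Int × List Int := ([93, 30, 55], [1, 30, 5])

def Spec_solution (progresses : List Int) (speeds : List Int) (out : List Int) : Prop :=
  out = solution_alt progresses speeds
instance (progresses : List Int) (speeds : List Int) (out : List Int) : Decidable (Spec_solution progresses speeds out) := by
  unfold Spec_solution; infer_instance

-- ===== CLAIM (what is proved, stated in full; the proofs are below) =====
def Claim_equal_solution : Prop := ∀ (progresses : List Int) (speeds : List Int), Dom_solution progresses speeds → Pre_solution progresses speeds → Spec_solution progresses speeds (solution progresses speeds)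
-- ===== LEMMAS AND PROOFS =====

-- proof-side abbreviations
def dq (q : Int × Int) : Int := max 1 (-(PySem.Int.floordiv (q.1 - 100) q.2))
def adv (t : Int) (l : List (Int × Int)) : List Int := l.map (fun q => q.1 + t * q.2)
def maxd (l : List (Int × Int)) : Int := l.foldr (fun q a => max (dq q) a) 0
def finishB (st : List Int × Int × Int) : List Int := if st.2.2 ≠ 0 then st.1 ++ [st.2.2] else st.1

lemma one_le_dq (q : Int × Int) : 1 ≤ dq q := le_max_left _ _

lemma done_iff (p s t : Int) (hs : 1 ≤ s) (ht : 1 ≤ t) : (100 ≤ p + t * s) ↔ dq (p, s) ≤ t := by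
  have h := PySem.Int.le_floordiv_iff_mul_le (a := p - 100) (b := s) (q := -t) (by omega)
  simp only [dq, max_le_iff]
  constructor
  · intro h100
    refine ⟨ht, ?_⟩
    have : -t * s ≤ p - 100 := by nlinarith
    have := h.mpr this
    omega
  · rintro ⟨-, h2⟩
    have : -t ≤ PySem.Int.floordiv (p - 100) s := by omega
    have := h.mp this
    nlinarith

lemma dq_le_bound (p s : Int) (hs : 1 ≤ s) : dq (p, s) ≤ ((p - 100).natAbs : Int) + 1 := by
  have hA : (0 : Int) ≤ ((p - 100).natAbs : Int) := by positivity
  have habs : -(((p - 100).natAbs : Int)) ≤ p - 100 := by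
    rcases Int.natAbs_eq (p - 100) with h | h <;> omega
  have h := PySem.Int.le_floordiv_iff_mul_le (a := p - 100) (b := s) (q := -(((p - 100).natAbs : Int) + 1)) (by omega)
  have hmul : -(((p - 100).natAbs : Int) + 1) * s ≤ p - 100 := by nlinarith
  have := h.mpr hmul
  simp only [dq, max_le_iff]
  omega

lemma maxd_cons (q : Int × Int) (l : List (Int × Int)) : maxd (q :: l) = max (dq q) (maxd l) := rfl

lemma maxd_sublist_le {l₁ l₂ : List (Int × Int)} (h : l₁.Sublist l₂) : maxd l₁ ≤ maxd l₂ := by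
  induction h with
  | slnil => simp [maxd]
  | cons q _ ih => rw [maxd_cons]; have := one_le_dq q; omega
  | cons₂ q _ ih => rw [maxd_cons, maxd_cons]; omega

lemma maxd_le_fuelA : ∀ (ps ss : List Int), (∀ q ∈ ps.zip ss, 1 ≤ q.2) →
    maxd (ps.zip ss) ≤ (fuelA ps : Int) := by
  intro ps
  induction ps with
  | nil => intro ss _; simp [maxd, fuelA]
  | cons p ps ih =>
    intro ss hs
    cases ss with
    | nil => simp only [List.zip_nil_right, maxd, List.foldr_nil, fuelA, List.foldr_cons]; positivity
    | cons s ss =>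
      simp only [List.zip_cons_cons, maxd_cons] at *
      have h1 : 1 ≤ s := hs (p, s) (by simp)
      have hd := dq_le_bound p s h1
      have h2 := ih ss (fun q hq => hs q (by simp [hq]))
      simp only [fuelA, List.foldr_cons] at *
      have hc : (0 : Int) ≤ ((List.foldr (fun p a => (p - 100).natAbs + 1 + a) 1 ps : Nat) : Int) :=
        Int.natCast_nonneg _
      have he : (0 : Int) ≤ (((p - 100).natAbs : Nat) : Int) := Int.natCast_nonneg _
      rw [Nat.cast_add, Nat.cast_add]
      apply max_le
      · omega
      · omega

lemma addSpeeds_adv : ∀ (l : List (Int × Int)) (rest : List Int) (t : Int),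
    addSpeeds (adv t l) (l.map Prod.snd ++ rest) = adv (t + 1) l := by
  intro l
  induction l with
  | nil => intro rest t; simp [addSpeeds, adv]
  | cons q l ih =>
    intro rest t
    show (q.1 + t * q.2 + q.2) :: addSpeeds (adv t l) (l.map Prod.snd ++ rest)
        = (q.1 + (t + 1) * q.2) :: adv (t + 1) l
    rw [ih rest t]
    congr 1
    ring

lemma popDone_cons_ge (p : Int) (ps ss : List Int) (h : p ≥ 100) :
    popDone (p :: ps) ss = ((popDone ps (ss.drop 1)).1 + 1, (popDone ps (ss.drop 1)).2.1,
      (popDone ps (ss.drop 1)).2.2) := by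
  simp [popDone, h]

lemma popDone_cons_lt (p : Int) (ps ss : List Int) (h : ¬ p ≥ 100) :
    popDone (p :: ps) ss = (0, p :: ps, ss) := by
  simp [popDone, h]

lemma popDone_adv : ∀ (l : List (Int × Int)) (rest : List Int) (u : Int), 1 ≤ u →
    (∀ q ∈ l, 1 ≤ q.2) →
    popDone (adv u l) (l.map Prod.snd ++ rest) =
      ((l.takeWhile (fun q => decide (dq q ≤ u))).length,
       adv u (l.dropWhile (fun q => decide (dq q ≤ u))),
       (l.dropWhile (fun q => decide (dq q ≤ u))).map Prod.snd ++ rest) := by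
  intro l
  induction l with
  | nil => intro rest u _ _; simp [adv, popDone]
  | cons q l ih =>
    intro rest u hu hs
    have h1 : 1 ≤ q.2 := hs q (by simp)
    have hiff := done_iff q.1 q.2 u h1 hu
    have e1 : adv u (q :: l) = (q.1 + u * q.2) :: adv u l := by
      cases q; rfl
    have e2 : (q :: l).map Prod.snd ++ rest = q.2 :: (l.map Prod.snd ++ rest) := rfl
    have hiff' : 100 ≤ q.1 + u * q.2 ↔ dq q ≤ u := by cases q; exact hiff
    by_cases hle : dq q ≤ u
    · have hge : q.1 + u * q.2 ≥ 100 := hiff'.mpr hle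
      rw [e1, e2, popDone_cons_ge _ _ _ hge]
      simp only [List.drop_succ_cons, List.drop_zero]
      rw [ih rest u hu (fun r hr => hs r (by simp [hr]))]
      rw [List.takeWhile_cons, List.dropWhile_cons]
      simp [hle]
    · have hlt : ¬ (q.1 + u * q.2 ≥ 100) := fun h => hle (hiff'.mp h)
      rw [e1, e2, popDone_cons_lt _ _ _ hlt]
      rw [List.takeWhile_cons, List.dropWhile_cons]
      simp [hle, e1]

lemma head?_dropWhile_false {α : Type} (p : α → Bool) :
    ∀ (l : List α) (a : α), (l.dropWhile p).head? = some a → p a = false := by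
  intro l
  induction l with
  | nil => intro a h; simp [List.dropWhile] at h
  | cons x l ih =>
    intro a h
    rw [List.dropWhile_cons] at h
    by_cases hx : p x = true
    · rw [if_pos hx] at h; exact ih a h
    · rw [if_neg hx] at h
      simp only [List.head?_cons, Option.some.injEq] at h
      subst h
      simpa using hx

lemma stepB_new (A : List Int) (c t t' : Int) (q : Int × Int) (h : t < dq q) (h' : t' < dq q) :
    stepB (A, t, c) q = stepB (A, t', c) q := by
  simp only [dq] at h h'
  simp only [stepB]
  rw [if_pos h, if_pos h']

lemma foldB_run : ∀ (l l₂ : List (Int × Int)) (A : List Int) (u k : Int),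
    (∀ q ∈ l, dq q ≤ u) →
    List.foldl stepB (A, u, k) (l ++ l₂) = List.foldl stepB (A, u, k + l.length) l₂ := by
  intro l
  induction l with
  | nil => intro l₂ A u k _; simp
  | cons q l ih =>
    intro l₂ A u k h
    have hq : dq q ≤ u := h q (by simp)
    have hq' : max 1 (-(PySem.Int.floordiv (q.1 - 100) q.2)) ≤ u := hq
    have : stepB (A, u, k) q = (A, u, k + 1) := by
      simp only [stepB]
      rw [if_neg (not_lt.mpr hq')]
    simp only [List.cons_append, List.foldl_cons, this]
    rw [ih l₂ A u (k + 1) (fun r hr => h r (by simp [hr]))]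
    have hk : k + 1 + (l.length : Int) = k + (((q :: l).length : Nat) : Int) := by
      simp only [List.length_cons]
      push_cast
      ring
    rw [hk]

lemma mainL : ∀ (fuel : Nat) (l : List (Int × Int)) (rest ans : List Int) (c t : Int),
    (∀ q ∈ l, 1 ≤ q.2) → 0 ≤ t →
    (∀ q, l.head? = some q → t < dq q) →
    maxd l ≤ t + fuel →
    loopA fuel (adv t l) (l.map Prod.snd ++ rest) (if c ≠ 0 then ans ++ [c] else ans)
      = finishB (List.foldl stepB (ans, t, c) l) := by
  intro fuel
  induction fuel with
  | zero =>
    intro l rest ans c t hs ht hh hf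
    cases l with
    | nil => simp [loopA, finishB]
    | cons q l =>
      exfalso
      have := hh q rfl
      rw [maxd_cons] at hf
      omega
  | succ f ih =>
    intro l rest ans c t hs ht hh hf
    cases l with
    | nil => simp [adv, loopA, finishB]
    | cons q l =>
      have hq2 : 1 ≤ q.2 := hs q (by simp)
      have hqt : t < dq q := hh q rfl
      have hu : (1 : Int) ≤ t + 1 := by omega
      show loopA (f + 1) (adv t (q :: l)) _ _ = _
      rw [show adv t (q :: l) = (q.1 + t * q.2) :: adv t l from rfl]
      simp only [loopA]
      rw [show (q.1 + t * q.2) :: adv t l = adv t (q :: l) from rfl]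
      rw [show (q :: l).map Prod.snd ++ rest = (q :: l).map Prod.snd ++ rest from rfl]
      rw [addSpeeds_adv (q :: l) rest t]
      rw [popDone_adv (q :: l) rest (t + 1) hu hs]
      by_cases hle : dq q ≤ t + 1
      · -- the head finishes today: dq q = t + 1; a maximal prefix is popped
        set P := (q :: l).takeWhile (fun r => decide (dq r ≤ t + 1)) with hP
        set Dr := (q :: l).dropWhile (fun r => decide (dq r ≤ t + 1)) with hDr
        have hPcons : P = q :: l.takeWhile (fun r => decide (dq r ≤ t + 1)) := by
          rw [hP, List.takeWhile_cons, if_pos (by simpa using hle)]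
        have hm1 : 1 ≤ P.length := by rw [hPcons]; simp
        have hcast : ((P.length : Int) ≠ 0) := by
          have : (1 : Int) ≤ (P.length : Int) := by exact_mod_cast hm1
          omega
        rw [if_pos hcast]
        have hDrsub : Dr.Sublist (q :: l) := by rw [hDr]; exact List.dropWhile_sublist _
        have hDrmem : ∀ r ∈ Dr, 1 ≤ r.2 := fun r hr => hs r (hDrsub.mem hr)
        have hDrhead : ∀ r, Dr.head? = some r → t + 1 < dq r := by
          intro r hr
          have := head?_dropWhile_false _ (q :: l) r hr
          simp only [decide_eq_false_iff_not, not_le] at this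
          exact this
        have hDrmax : maxd Dr ≤ (t + 1) + f := by
          have := maxd_sublist_le hDrsub
          push_cast at hf ⊢
          omega
        have := ih Dr rest (if c ≠ 0 then ans ++ [c] else ans) (P.length : Int) (t + 1)
          hDrmem (by omega) hDrhead hDrmax
        rw [if_pos hcast] at this
        rw [this]
        -- now relate the two folds
        congr 1
        conv_rhs => rw [← List.takeWhile_append_dropWhile (p := fun r => decide (dq r ≤ t + 1)) (l := q :: l)]
        rw [show (q :: l).takeWhile (fun r => decide (dq r ≤ t + 1))
              = q :: l.takeWhile (fun r => decide (dq r ≤ t + 1)) from by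
            rw [List.takeWhile_cons, if_pos (by simpa using hle)], ← hDr]
        simp only [List.cons_append, List.foldl_cons]
        have hstep : stepB (ans, t, c) q = ((if c ≠ 0 then ans ++ [c] else ans), dq q, 1) := by
          simp only [stepB]
          rw [if_pos (by exact hqt)]
          rfl
        rw [hstep]

        have hdq : dq q = t + 1 := by omega
        rw [hdq]
        rw [foldB_run (l.takeWhile (fun r => decide (dq r ≤ t + 1))) Dr _ (t + 1) 1
          (fun r hr => by simpa using List.mem_takeWhile_imp hr)]
        have hk : (1 : Int) + ((l.takeWhile (fun r => decide (dq r ≤ t + 1))).length : Int)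
            = ((P.length : Nat) : Int) := by
          rw [hPcons]
          simp only [List.length_cons]
          push_cast
          ring
        rw [hk]
      · -- nobody finishes today: cnt = 0, one day passes
        have hPnil : (q :: l).takeWhile (fun r => decide (dq r ≤ t + 1)) = [] := by
          rw [List.takeWhile_cons, if_neg (by simpa using hle)]
        have hDrall : (q :: l).dropWhile (fun r => decide (dq r ≤ t + 1)) = q :: l := by
          rw [List.dropWhile_cons, if_neg (by simpa using hle)]
        rw [hPnil, hDrall]
        simp only [List.length_nil, Nat.cast_zero, ne_eq, not_true_eq_false]
        rw [if_neg (by simp)]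
        have hmax : maxd (q :: l) ≤ (t + 1) + f := by push_cast at hf ⊢; omega
        have hh' : ∀ r, (q :: l).head? = some r → t + 1 < dq r := by
          intro r hr
          simp only [List.head?_cons, Option.some.injEq] at hr
          subst hr
          omega
        rw [ih (q :: l) rest ans c (t + 1) hs (by omega) hh' hmax]
        congr 1
        simp only [List.foldl_cons]
        rw [stepB_new ans c t (t + 1) q hqt (by omega)]

lemma zip_snd_append_drop : ∀ (ps ss : List Int), ps.length ≤ ss.length →
    (ps.zip ss).map Prod.snd ++ ss.drop ps.length = ss := by
  intro ps
  induction ps with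
  | nil => intro ss _; simp
  | cons p ps ih =>
    intro ss h
    cases ss with
    | nil => simp at h
    | cons s ss =>
      simp only [List.zip_cons_cons, List.map_cons, List.cons_append, List.drop_succ_cons,
        List.length_cons]
      rw [ih ss (by simpa using h)]

lemma adv_zero (l : List (Int × Int)) : adv 0 l = l.map Prod.fst := by
  simp [adv]

-- ===== VERDICT (by name: the statement is the Claim_ definition above) =====
theorem solution_spec : Claim_equal_solution := by
  intro ps ss _ hpre
  obtain ⟨hlen, hsp⟩ := hpre
  unfold Spec_solution solution solution_alt
  have h0 : ps.zip ss = ps.zip ss := rfl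
  have hps : adv 0 (ps.zip ss) = ps := by
    rw [adv_zero, List.map_fst_zip hlen]
  have hss : (ps.zip ss).map Prod.snd ++ ss.drop ps.length = ss := zip_snd_append_drop ps ss hlen
  have hmax : maxd (ps.zip ss) ≤ 0 + (fuelA ps : Int) := by
    have := maxd_le_fuelA ps ss hsp
    omega
  have hmain := mainL (fuelA ps) (ps.zip ss) (ss.drop ps.length) [] 0 0 hsp le_rfl
    (fun q _ => by have := one_le_dq q; omega) hmax
  rw [if_neg (by simp), hps, hss] at hmain
  rw [hmain]
  rfl
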